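-- pv_equiv track=rewrite | github.com/Dheebz/advent-of-code | src/python/year_2019/solution_2019_day_17.py | replace_sequence
-- ===== SOURCE A (Python) =====
-- from typing import TYPE_CHECKING, Dict, List, Tuple
--
-- def replace_sequence(tokens: List[str], pattern: List[str], label: str) -> List[str]:
--     """Replace occurrences of a pattern with a label.
--
--     Args:
--         tokens (List[str]): Full token list.
--         pattern (List[str]): Pattern to replace.
--         label (str): Replacement label.
--
--     Returns:
--         List[str]: Tokens with pattern substituted.
--     """
--     result: List[str] = []
--     i = 0
--     while i < len(tokens):
--         if tokens[i : i + len(pattern)] == pattern: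
--             result.append(label)
--             i += len(pattern)
--         else:
--             result.append(tokens[i])
--             i += 1
--     return result
-- ===== SOURCE B (Python) =====
-- def replace_sequence(tokens, pattern, label):
--     """Rabin-Karp: hash tokens once, use rolling prefix hashes so a window is
--     compared by one modular subtraction, verifying only on hash hits."""
--     m = len(pattern)
--     if m == 0:
--         return list(tokens)
--     n = len(tokens)
--     MOD = 1000000007
--     BASE = 131
--
--     def token_hash(s):
--         h = 0
--         for c in s:
--             h = (h * 257 + ord(c)) % MOD
--         return h
--
--     tok = [token_hash(t) for t in tokens]
--     pre = [0]
--     acc = 0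
--     for v in tok:
--         acc = (acc * BASE + v) % MOD
--         pre.append(acc)
--     ph = 0
--     for t in pattern:
--         ph = (ph * BASE + token_hash(t)) % MOD
--     pw = pow(BASE, m, MOD)
--     out = []
--     i = 0
--     while i + m <= n:
--         if (pre[i + m] - pre[i] * pw) % MOD == ph and tokens[i:i + m] == pattern:
--             out.append(label)
--             i += m
--         else:
--             out.append(tokens[i])
--             i += 1
--     out.extend(tokens[i:])
--     return out
-- ===== Notes on version B (the rewrite author's own statement) =====
-- stated objective: faster
-- what changed: Replaces A's per-position slice-and-compare scan with Rabin-Karp: tokens are hashed once, rolling prefix hashes let each window be tested by one modular subtraction, and the full slice comparison runs only on hash hits; Pre_ excludes only pattern=[] with nonempty tokens, where A's while loop never advances i and loops forever.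
import Mathlib
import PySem

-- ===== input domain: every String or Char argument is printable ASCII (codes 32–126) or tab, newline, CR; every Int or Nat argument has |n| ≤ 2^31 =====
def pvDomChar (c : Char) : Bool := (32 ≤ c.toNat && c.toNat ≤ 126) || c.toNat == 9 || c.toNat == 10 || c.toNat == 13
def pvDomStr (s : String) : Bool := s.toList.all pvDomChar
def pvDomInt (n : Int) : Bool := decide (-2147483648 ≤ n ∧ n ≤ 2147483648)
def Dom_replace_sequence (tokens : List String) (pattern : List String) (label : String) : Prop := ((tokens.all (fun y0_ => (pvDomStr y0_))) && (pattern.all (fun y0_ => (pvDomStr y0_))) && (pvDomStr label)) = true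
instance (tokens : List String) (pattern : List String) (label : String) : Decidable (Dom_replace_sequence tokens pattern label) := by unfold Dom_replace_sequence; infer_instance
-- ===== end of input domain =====

-- B replaces A's slice-and-compare at every position by a Rabin-Karp rolling prefix hash
-- (tokens hashed once, each window compared by one modular subtraction, verified on hash hits):
-- asymptotically faster when the pattern is long.

-- ===== PORT A =====
-- the while loop of A as structural recursion on a fuel counter (tokens.length + 1 suffices
-- for every terminating run of A; A does not terminate when pattern = [] and tokens ≠ [])
def goA (tokens pattern : List String) (label : String) : Nat → Nat → List String → List String
  | 0, _, result => result
  | fuel+1, i, result =>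
    if i < tokens.length then
      if PySem.List.slice tokens (some (i : Int)) (some ((i : Int) + (pattern.length : Int))) = pattern then
        goA tokens pattern label fuel (i + pattern.length) (result ++ [label])
      else
        goA tokens pattern label fuel (i + 1) (result ++ [(PySem.List.pyGet? tokens (i : Int)).getD ""])
    else result

def replace_sequence (tokens : List String) (pattern : List String) (label : String) : List String :=
  goA tokens pattern label (tokens.length + 1) 0 []

-- ===== PORT B =====
-- token_hash of Source B
def rsHash (s : String) : Int :=
  s.toList.foldl (fun h c => PySem.Int.mod (h * 257 + (c.toNat : Int)) 1000000007) 0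

-- the prefix-hash loop of Source B (pre, without its leading 0), structural recursion over tok
def buildPre : List Int → Int → List Int
  | [], _ => []
  | v :: r, acc =>
    let a := PySem.Int.mod (acc * 131 + v) 1000000007
    a :: buildPre r a

-- the pattern-hash loop of Source B
def polyH (l : List Int) : Int :=
  l.foldl (fun h v => PySem.Int.mod (h * 131 + v) 1000000007) 0

-- the while loop of Source B (fuel as for goA; the loop always terminates since pattern ≠ [] here)
def goB (tokens pattern : List String) (label : String) (pre : List Int) (ph pw : Int) :
    Nat → Nat → List String → List String
  | 0, _, out => out
  | fuel+1, i, out =>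
    if i + pattern.length ≤ tokens.length then
      if PySem.Int.mod (pre.getD (i + pattern.length) 0 - pre.getD i 0 * pw) 1000000007 = ph
         ∧ PySem.List.slice tokens (some (i : Int)) (some ((i : Int) + (pattern.length : Int))) = pattern then
        goB tokens pattern label pre ph pw fuel (i + pattern.length) (out ++ [label])
      else
        goB tokens pattern label pre ph pw fuel (i + 1) (out ++ [(PySem.List.pyGet? tokens (i : Int)).getD ""])
    else out ++ tokens.drop i    -- loop exit, then out.extend(tokens[i:])

def replace_sequence_alt (tokens : List String) (pattern : List String) (label : String) : List String :=
  if pattern.length = 0 then tokens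
  else
    let tok := tokens.map rsHash
    let pre := 0 :: buildPre tok 0
    let ph := polyH (pattern.map rsHash)
    let pw := PySem.Int.powMod 131 pattern.length 1000000007
    goB tokens pattern label pre ph pw (tokens.length + 1) 0 []

-- ===== PRECONDITION & SPEC =====
-- Pre_ excludes only pattern = [] with tokens ≠ [], where A's while loop never advances i and
-- Python A loops forever (no value is returned there).
def Pre_replace_sequence (tokens : List String) (pattern : List String) (label : String) : Prop :=
  tokens = [] ∨ pattern ≠ []
instance (tokens : List String) (pattern : List String) (label : String) : Decidable (Pre_replace_sequence tokens pattern label) := by unfold Pre_replace_sequence; infer_instance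

def pvWitness_replace_sequence : List String × List String × String :=
  (["a", "b", "a", "b", "c"], ["a", "b"], "X")

def Spec_replace_sequence (tokens : List String) (pattern : List String) (label : String) (out : List String) : Prop := out = replace_sequence_alt tokens pattern label
instance (tokens : List String) (pattern : List String) (label : String) (out : List String) : Decidable (Spec_replace_sequence tokens pattern label out) := by unfold Spec_replace_sequence; infer_instance

-- ===== CLAIM (what is proved, stated in full; the proofs are below) =====
def Claim_equal_replace_sequence : Prop := ∀ (tokens : List String) (pattern : List String) (label : String), Dom_replace_sequence tokens pattern label → Pre_replace_sequence tokens pattern label → Spec_replace_sequence tokens pattern label (replace_sequence tokens pattern label)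

-- ===== LEMMAS AND PROOFS =====

-- raw (un-reduced) polynomial fold, the mathematical shadow of buildPre/polyH
def rawP (l : List Int) (a : Int) : Int := l.foldl (fun h v => h * 131 + v) a

lemma step_mod (a v : Int) : (a % 1000000007 * 131 + v) % 1000000007 = (a * 131 + v) % 1000000007 := by
  have h : a % 1000000007 ≡ a [ZMOD 1000000007] := Int.emod_emod_of_dvd a dvd_rfl
  exact (h.mul_right 131).add_right v

lemma foldl_mod (l : List Int) : ∀ a : Int,
    l.foldl (fun h v => PySem.Int.mod (h * 131 + v) 1000000007) (a % 1000000007)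
      = rawP l a % 1000000007 := by
  induction l with
  | nil => intro a; simp [rawP]
  | cons v r ih =>
    intro a
    simp only [List.foldl_cons]
    have h1 : PySem.Int.mod (a % 1000000007 * 131 + v) 1000000007 = (a * 131 + v) % 1000000007 := by
      rw [PySem.Int.mod_eq_emod_of_pos (by norm_num), step_mod]
    rw [h1]
    have := ih (a * 131 + v)
    simpa [rawP] using this

lemma polyH_eq_rawP (l : List Int) : polyH l = rawP l 0 % 1000000007 := by
  have := foldl_mod l 0
  simpa [polyH] using this

lemma rawP_shift (l : List Int) (a : Int) : rawP l a = a * 131 ^ l.length + rawP l 0 := by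
  induction l generalizing a with
  | nil => simp [rawP]
  | cons v r ih =>
    have h1 : rawP (v :: r) a = rawP r (a * 131 + v) := by simp [rawP]
    have h2 : rawP (v :: r) 0 = rawP r v := by simp [rawP]
    rw [h1, h2, ih (a * 131 + v), ih v]
    simp only [List.length_cons, pow_succ]
    ring

lemma buildPre_getD : ∀ (tok : List Int) (a : Int) (k : Nat), k < tok.length →
    (buildPre tok (a % 1000000007)).getD k 0 = rawP (tok.take (k+1)) a % 1000000007 := by
  intro tok
  induction tok with
  | nil => intro a k hk; simp at hk
  | cons v r ih =>
    intro a k hk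
    have hx : PySem.Int.mod (a % 1000000007 * 131 + v) 1000000007 = (a * 131 + v) % 1000000007 := by
      rw [PySem.Int.mod_eq_emod_of_pos (by norm_num), step_mod]
    cases k with
    | zero =>
      simp only [buildPre, List.getD_cons_zero, List.take_succ_cons, List.take_zero]
      simpa [rawP] using hx
    | succ k =>
      have hk' : k < r.length := by simpa using hk
      have := ih (a * 131 + v) k hk'
      simp only [buildPre, List.getD_cons_succ, hx]
      rw [this]
      simp [rawP]

lemma pre_getD (tok : List Int) (k : Nat) (hk : k ≤ tok.length) :
    ((0 :: buildPre tok 0).getD k 0) = rawP (tok.take k) 0 % 1000000007 := by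
  cases k with
  | zero => simp [rawP]
  | succ k =>
    have hk' : k < tok.length := by omega
    have h := buildPre_getD tok 0 k hk'
    simp only [List.getD_cons_succ]
    simpa using h

-- the window identity: the rolling-hash expression equals the hash of the window
lemma window_hash (tok : List Int) (i m : Nat) (hm : i + m ≤ tok.length) :
    PySem.Int.mod ((0 :: buildPre tok 0).getD (i + m) 0
        - (0 :: buildPre tok 0).getD i 0 * PySem.Int.powMod 131 m 1000000007) 1000000007
      = rawP ((tok.drop i).take m) 0 % 1000000007 := by
  have hpw : PySem.Int.powMod 131 m 1000000007 = (131 ^ m : Int) % 1000000007 := by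
    simp only [PySem.Int.powMod]
    rw [PySem.Int.mod_eq_emod_of_pos (by norm_num)]
  rw [PySem.Int.mod_eq_emod_of_pos (by norm_num), hpw,
      pre_getD tok (i + m) hm, pre_getD tok i (by omega)]
  have hsplit : tok.take (i + m) = tok.take i ++ (tok.drop i).take m := List.take_add ..
  have hlen : ((tok.drop i).take m).length = m := by
    simp [List.length_take, List.length_drop]; omega
  have hraw : rawP (tok.take (i + m)) 0
      = rawP (tok.take i) 0 * 131 ^ m + rawP ((tok.drop i).take m) 0 := by
    rw [hsplit]
    have : rawP (tok.take i ++ (tok.drop i).take m) 0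
        = rawP ((tok.drop i).take m) (rawP (tok.take i) 0) := by
      simp [rawP, List.foldl_append]
    rw [this, rawP_shift, hlen]
  set X := rawP (tok.take i) 0 with hX
  set W := rawP ((tok.drop i).take m) 0 with hW
  have h1 : (rawP (tok.take (i + m)) 0 % 1000000007) ≡ X * 131 ^ m + W [ZMOD 1000000007] := by
    rw [hraw] at *
    exact Int.emod_emod_of_dvd _ dvd_rfl
  have h2 : (X % 1000000007) * ((131 ^ m : Int) % 1000000007) ≡ X * 131 ^ m [ZMOD 1000000007] :=
    Int.ModEq.mul (Int.emod_emod_of_dvd X dvd_rfl) (Int.emod_emod_of_dvd _ dvd_rfl)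
  have h3 := (h1.sub h2).trans (by rw [add_sub_cancel_left])
  exact h3

-- A's tail: once fewer than pattern.length tokens remain, every step copies one token
lemma goA_tail (tokens pattern : List String) (label : String) :
    ∀ fuel i out, tokens.length < i + pattern.length → tokens.length - i < fuel →
      goA tokens pattern label fuel i out = out ++ tokens.drop i := by
  intro fuel
  induction fuel with
  | zero => intro i out h1 h2; omega
  | succ f ih =>
    intro i out h1 h2
    by_cases hi : i < tokens.length
    · have hslice : PySem.List.slice tokens (some (i : Int)) (some ((i : Int) + (pattern.length : Int))) ≠ pattern := by
        rw [PySem.List.slice_natCast_add]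
        intro hc
        have := congrArg List.length hc
        simp [List.length_take, List.length_drop] at this
        omega
      have hget : (PySem.List.pyGet? tokens (i : Int)).getD "" = tokens[i] := by
        rw [PySem.List.pyGet?_natCast]
        simp [List.getElem?_eq_getElem hi]
      rw [goA, if_pos hi, if_neg hslice, ih (i + 1) _ (by omega) (by omega), hget,
          List.drop_eq_getElem_cons hi]
      simp
    · rw [goA, if_neg hi]
      rw [List.drop_of_length_le (by omega)]
      simp

-- main simulation: with pattern ≠ [], the two loops agree step for step
lemma goA_eq_goB (tokens pattern : List String) (label : String) (hm : pattern ≠ []) :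
    ∀ fuel i out, tokens.length - i < fuel →
      goA tokens pattern label fuel i out =
        goB tokens pattern label (0 :: buildPre (tokens.map rsHash) 0)
          (polyH (pattern.map rsHash)) (PySem.Int.powMod 131 pattern.length 1000000007)
          fuel i out := by
  have hm1 : 1 ≤ pattern.length := List.length_pos_iff.mpr hm
  intro fuel
  induction fuel with
  | zero => intro i out h; omega
  | succ f ih =>
    intro i out h
    by_cases hin : i + pattern.length ≤ tokens.length
    · have hi : i < tokens.length := by omega
      by_cases hsl : PySem.List.slice tokens (some (i : Int)) (some ((i : Int) + (pattern.length : Int))) = pattern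
      · have hhash : PySem.Int.mod ((0 :: buildPre (tokens.map rsHash) 0).getD (i + pattern.length) 0
              - (0 :: buildPre (tokens.map rsHash) 0).getD i 0 * PySem.Int.powMod 131 pattern.length 1000000007) 1000000007
            = polyH (pattern.map rsHash) := by
          rw [window_hash (tokens.map rsHash) i pattern.length (by simpa using hin)]
          have hwin : ((tokens.map rsHash).drop i).take pattern.length = pattern.map rsHash := by
            rw [← List.map_drop, ← List.map_take]
            rw [PySem.List.slice_natCast_add] at hsl
            rw [hsl]
          rw [hwin, polyH_eq_rawP]
        rw [goA, if_pos hi, if_pos hsl, goB, if_pos hin, if_pos ⟨hhash, hsl⟩]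
        exact ih (i + pattern.length) _ (by omega)
      · have hcond : ¬ (PySem.Int.mod ((0 :: buildPre (tokens.map rsHash) 0).getD (i + pattern.length) 0
              - (0 :: buildPre (tokens.map rsHash) 0).getD i 0 * PySem.Int.powMod 131 pattern.length 1000000007) 1000000007
            = polyH (pattern.map rsHash)
            ∧ PySem.List.slice tokens (some (i : Int)) (some ((i : Int) + (pattern.length : Int))) = pattern) := by
          intro hc; exact hsl hc.2
        rw [goA, if_pos hi, if_neg hsl, goB, if_pos hin, if_neg hcond]
        exact ih (i + 1) _ (by omega)
    · rw [goB, if_neg hin]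
      exact goA_tail tokens pattern label (f + 1) i out (by omega) h

-- ===== VERDICT (by name: the statement is the Claim_ definition above) =====
theorem replace_sequence_spec : Claim_equal_replace_sequence := by
  intro tokens pattern label _ hpre
  unfold Spec_replace_sequence replace_sequence replace_sequence_alt
  by_cases hp : pattern = []
  · rcases hpre with h | h
    · subst h hp; rfl
    · exact absurd hp h
  · rw [if_neg (by simpa using fun h => hp (List.length_eq_zero_iff.mp h))]
    exact goA_eq_goB tokens pattern label hp (tokens.length + 1) 0 [] (by omega)
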